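-- pv_equiv track=rewrite | github.com/D250709/lianxisheng | python/8.5.py | count_unplaced_fruits
-- ===== SOURCE A (Python) =====
-- def count_unplaced_fruits(fruits, baskets):
--     # 对篮子进行排序以便我们可以找到第一个符合条件的篮子
--     baskets.sort()
--     unplaced_count = 0
--
--     for fruit in fruits:
--         placed = False
--         for i, basket in enumerate(baskets):
--             if basket >= fruit:
--                 # 找到合适的篮子后移除它以防止再次使用
--                 del baskets[i]
--                 placed = True
--                 break
--
--         if not placed:
--             unplaced_count += 1
--
--     return unplaced_count
-- ===== SOURCE B (Python) =====
-- def count_unplaced_fruits(fruits, baskets):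
--     # Binary search (hand-rolled bisect_left) over a sorted copy instead of a
--     # linear scan per fruit; does not mutate the caller's baskets list.
--     avail = sorted(baskets)
--     unplaced = 0
--     for fruit in fruits:
--         lo, hi = 0, len(avail)
--         while lo < hi:
--             mid = (lo + hi) // 2
--             if avail[mid] < fruit:
--                 lo = mid + 1
--             else:
--                 hi = mid
--         if lo < len(avail):
--             del avail[lo]
--         else:
--             unplaced += 1
--     return unplaced
-- ===== Notes on version B (the rewrite author's own statement) =====
-- stated objective: faster
-- what changed: Replaces A's linear scan over the sorted baskets for each fruit with a hand-rolled bisect_left binary search on a sorted copy (and does not mutate the caller's baskets list).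
import Mathlib
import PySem

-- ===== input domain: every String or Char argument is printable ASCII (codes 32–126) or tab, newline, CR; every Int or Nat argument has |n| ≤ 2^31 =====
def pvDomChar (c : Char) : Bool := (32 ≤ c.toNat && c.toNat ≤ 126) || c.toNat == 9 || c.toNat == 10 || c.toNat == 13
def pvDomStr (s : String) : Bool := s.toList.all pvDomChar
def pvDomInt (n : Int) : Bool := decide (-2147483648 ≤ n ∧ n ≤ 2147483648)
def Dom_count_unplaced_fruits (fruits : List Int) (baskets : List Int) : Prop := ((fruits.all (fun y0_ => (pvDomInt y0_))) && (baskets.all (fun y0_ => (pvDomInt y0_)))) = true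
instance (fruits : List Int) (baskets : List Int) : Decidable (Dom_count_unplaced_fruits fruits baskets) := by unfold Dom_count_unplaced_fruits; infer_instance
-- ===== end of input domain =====

-- B replaces A's linear scan for the first basket ≥ fruit by a hand-rolled binary search on a
-- sorted copy (objective: faster, constant-factor). Return-value equivalence only: A sorts and
-- deletes from the caller's `baskets` list in place, B does not mutate it.

-- ===== PORT A =====
-- A's inner loop: scan the (sorted) baskets; on the first basket ≥ fruit delete it (some rest'),
-- otherwise report failure (none).
def aPlace (fruit : Int) : List Int → Option (List Int)
  | [] => none
  | b :: rest => if b ≥ fruit then some rest else (aPlace fruit rest).map (b :: ·)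

def count_unplaced_fruits (fruits : List Int) (baskets : List Int) : Int :=
  -- baskets.sort()
  let sortedB := PySem.List.sorted baskets (fun x => x)
  -- the outer for-loop: state = (remaining baskets, unplaced_count)
  let st := fruits.foldl (fun (st : List Int × Int) fruit =>
    match aPlace fruit st.1 with
    | some rest => (rest, st.2)
    | none => (st.1, st.2 + 1)) (sortedB, 0)
  st.2

-- ===== PORT B =====
-- Source B's while-loop `lo, hi` binary search; avail[mid] is ported as getD (mid < len(avail) always
-- holds inside the loop, so the plain lookup is exact).
def bsLoop (a : List Int) (x : Int) (lo hi : Nat) : Nat :=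
  if _h : lo < hi then
    let mid := (lo + hi) / 2
    if a.getD mid 0 < x then bsLoop a x (mid + 1) hi else bsLoop a x lo mid
  else lo
termination_by hi - lo
decreasing_by all_goals omega

def count_unplaced_fruits_alt (fruits : List Int) (baskets : List Int) : Int :=
  let st := fruits.foldl (fun (st : List Int × Int) fruit =>
    let avail := st.1
    let lo := bsLoop avail fruit 0 avail.length
    if lo < avail.length then
      -- del avail[lo]
      (avail.take lo ++ avail.drop (lo + 1), st.2)
    else (avail, st.2 + 1)) (PySem.List.sorted baskets (fun x => x), 0)
  st.2

-- ===== PRECONDITION & SPEC =====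
def Spec_count_unplaced_fruits (fruits : List Int) (baskets : List Int) (out : Int) : Prop := out = count_unplaced_fruits_alt fruits baskets
instance (fruits : List Int) (baskets : List Int) (out : Int) : Decidable (Spec_count_unplaced_fruits fruits baskets out) := by unfold Spec_count_unplaced_fruits; infer_instance

-- ===== CLAIM (what is proved, stated in full; the proofs are below) =====
def Claim_equal_count_unplaced_fruits : Prop := ∀ (fruits : List Int) (baskets : List Int), Dom_count_unplaced_fruits fruits baskets → Spec_count_unplaced_fruits fruits baskets (count_unplaced_fruits fruits baskets)

-- ===== LEMMAS AND PROOFS =====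

-- the index both searches compute: first index whose basket is ≥ fruit (length if none)
def firstGe (f : Int) (l : List Int) : Nat := l.findIdx (fun b => f ≤ b)

lemma firstGe_le_length (f : Int) (l : List Int) : firstGe f l ≤ l.length := by
  simpa [firstGe] using List.findIdx_le_length (p := fun b => decide (f ≤ b)) (xs := l)

lemma firstGe_lt (f : Int) (l : List Int) (j : Nat) (hj : j < l.length)
    (h : j < firstGe f l) : l[j] < f := by
  have := List.not_of_lt_findIdx (p := fun b => decide (f ≤ b)) (xs := l) h
  simpa using this

lemma firstGe_self (f : Int) (l : List Int) (h : firstGe f l < l.length) :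
    f ≤ l[firstGe f l] := by
  have := List.findIdx_getElem (p := fun b => decide (f ≤ b)) (xs := l) (w := h)
  simpa using this

lemma firstGe_eq (f : Int) (l : List Int) (r : Nat) (hr : r ≤ l.length)
    (hlt : ∀ j (hj : j < l.length), j < r → l[j] < f)
    (hge : ∀ (h : r < l.length), f ≤ l[r]) : firstGe f l = r := by
  rcases lt_trichotomy (firstGe f l) r with h | h | h
  · have hlen : firstGe f l < l.length := lt_of_lt_of_le h hr
    exact absurd (firstGe_self f l hlen) (not_le.mpr (hlt _ hlen h))
  · exact h
  · have hlen : r < l.length := lt_of_lt_of_le h (firstGe_le_length f l)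
    exact absurd (hge hlen) (not_le.mpr (firstGe_lt f l r hlen h))

-- A's scan returns exactly: erase the first basket ≥ fruit, or fail if there is none.
lemma aPlace_char (f : Int) (l : List Int) :
    aPlace f l = if firstGe f l < l.length then some (l.eraseIdx (firstGe f l)) else none := by
  induction l with
  | nil => simp [aPlace, firstGe]
  | cons b rest ih =>
    by_cases hb : f ≤ b
    · simp [aPlace, firstGe, hb, ge_iff_le, List.findIdx_cons]
    · have hfg : firstGe f (b :: rest) = firstGe f rest + 1 := by
        simp [firstGe, List.findIdx_cons, hb]
      have hnb : ¬ (b ≥ f) := hb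
      by_cases hlt : firstGe f rest < rest.length
      · simp [aPlace, hnb, ih, hfg, hlt, List.eraseIdx_cons_succ]
      · simp [aPlace, hnb, ih, hfg, hlt]

-- The binary-search loop invariant: everything below lo is < f, everything from hi on is ≥ f.
lemma bsLoop_eq (l : List Int) (f : Int) (hs : l.Pairwise (· ≤ ·)) :
    ∀ n lo hi, hi - lo ≤ n → hi ≤ l.length → lo ≤ hi →
    (∀ j (hj : j < l.length), j < lo → l[j] < f) →
    (∀ j (hj : j < l.length), hi ≤ j → f ≤ l[j]) →
    bsLoop l f lo hi = firstGe f l := by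
  have mono : ∀ i j (hi : i < l.length) (hj : j < l.length), i ≤ j → l[i] ≤ l[j] := by
    intro i j hi hj hij
    rcases Nat.lt_or_ge i j with h | h
    · exact (List.pairwise_iff_getElem.mp hs) i j hi hj h
    · have : i = j := le_antisymm hij h
      subst this; exact le_refl _
  intro n
  induction n with
  | zero =>
    intro lo hi hn hhi hlohi hlow hhigh
    have : lo = hi := by omega
    subst this
    rw [bsLoop]; simp only [lt_irrefl]
    exact (firstGe_eq f l lo hhi (fun j hj h => hlow j hj h)
      (fun h => hhigh lo h (le_refl _))).symm
  | succ n ih =>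
    intro lo hi hn hhi hlohi hlow hhigh
    by_cases h : lo < hi
    · rw [bsLoop]; simp only [h, dif_pos]
      have hmidlt : (lo + hi) / 2 < hi := by omega
      have hmidge : lo ≤ (lo + hi) / 2 := by omega
      have hmidlen : (lo + hi) / 2 < l.length := lt_of_lt_of_le hmidlt hhi
      rw [List.getD_eq_getElem l 0 hmidlen]
      by_cases hc : l[(lo + hi) / 2] < f
      · simp only [hc, if_pos]
        exact ih ((lo + hi) / 2 + 1) hi (by omega) hhi (by omega)
          (fun j hj hjlt => lt_of_le_of_lt (mono j ((lo+hi)/2) hj hmidlen (by omega)) hc)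
          hhigh
      · simp only [hc]
        exact ih lo ((lo + hi) / 2) (by omega) (le_of_lt hmidlen) hmidge hlow
          (fun j hj hjge => le_trans (not_lt.mp hc) (mono ((lo+hi)/2) j hmidlen hj hjge))
    · rw [bsLoop]; simp only [h]
      have : lo = hi := by omega
      subst this
      exact (firstGe_eq f l lo hhi (fun j hj hlt => hlow j hj hlt)
        (fun hlen => hhigh lo hlen (le_refl _))).symm

lemma bsLoop_firstGe (l : List Int) (f : Int) (hs : l.Pairwise (· ≤ ·)) :
    bsLoop l f 0 l.length = firstGe f l :=
  bsLoop_eq l f hs l.length 0 l.length (by omega) (le_refl _) (Nat.zero_le _)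
    (by omega) (fun j hj hge => absurd hj (by omega))

lemma fold_eq (fruits : List Int) :
    ∀ (l : List Int) (c : Int), l.Pairwise (· ≤ ·) →
    fruits.foldl (fun (st : List Int × Int) fruit =>
      match aPlace fruit st.1 with
      | some rest => (rest, st.2)
      | none => (st.1, st.2 + 1)) (l, c)
    = fruits.foldl (fun (st : List Int × Int) fruit =>
      let avail := st.1
      let lo := bsLoop avail fruit 0 avail.length
      if lo < avail.length then (avail.take lo ++ avail.drop (lo + 1), st.2)
      else (avail, st.2 + 1)) (l, c) := by
  induction fruits with
  | nil => intro l c _; rfl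
  | cons f rest ih =>
    intro l c hs
    simp only [List.foldl_cons]
    have hbs : bsLoop l f 0 l.length = firstGe f l := bsLoop_firstGe l f hs
    have herase : l.take (firstGe f l) ++ l.drop (firstGe f l + 1) = l.eraseIdx (firstGe f l) :=
      (List.eraseIdx_eq_take_drop_succ l (firstGe f l)).symm
    by_cases h : firstGe f l < l.length
    · have hstep : (match aPlace f l with
          | some rest => (rest, c)
          | none => (l, c + 1)) = (l.eraseIdx (firstGe f l), c) := by
        rw [aPlace_char]; simp [h]
      rw [hstep]
      have hsorted' : (l.eraseIdx (firstGe f l)).Pairwise (· ≤ ·) :=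
        hs.sublist (List.eraseIdx_sublist l (firstGe f l))
      rw [ih _ _ hsorted']
      simp [hbs, h, herase]
    · have hstep : (match aPlace f l with
          | some rest => (rest, c)
          | none => (l, c + 1)) = (l, c + 1) := by
        rw [aPlace_char]; simp [h]
      rw [hstep, ih _ _ hs]
      simp [hbs, h]

-- ===== VERDICT (by name: the statement is the Claim_ definition above) =====
theorem count_unplaced_fruits_spec : Claim_equal_count_unplaced_fruits := by
  intro fruits baskets _
  unfold Spec_count_unplaced_fruits count_unplaced_fruits count_unplaced_fruits_alt
  have hs : (PySem.List.sorted baskets (fun x => x)).Pairwise (· ≤ ·) := by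
    simpa using PySem.List.sorted_pairwise baskets (fun x => x)
  simp only [fold_eq fruits (PySem.List.sorted baskets (fun x => x)) 0 hs]
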